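-- pv_equiv track=rewrite | github.com/Hans345/CAS-Projektarbeit | comDeviceDictionary.py | addCRC
-- ===== SOURCE A (Python) =====
-- def addCRC(data):
--     """
--     Berechnet CRC-16 für Modubus und hängt sie an die Daten an.
--     Daten als Integer-Array.
--     Quelle: minimalmodbus.py von Jonas Berg auf github
--     """
--     crc16tabelle = (
--             0, 49345, 49537,   320, 49921,   960,   640, 49729, 50689,  1728,  1920,
--         51009,  1280, 50625, 50305,  1088, 52225,  3264,  3456, 52545,  3840, 53185,
--         52865,  3648,  2560, 51905, 52097,  2880, 51457,  2496,  2176, 51265, 55297,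
--          6336,  6528, 55617,  6912, 56257, 55937,  6720,  7680, 57025, 57217,  8000,
--         56577,  7616,  7296, 56385,  5120, 54465, 54657,  5440, 55041,  6080,  5760,
--         54849, 53761,  4800,  4992, 54081,  4352, 53697, 53377,  4160, 61441, 12480,
--         12672, 61761, 13056, 62401, 62081, 12864, 13824, 63169, 63361, 14144, 62721,
--         13760, 13440, 62529, 15360, 64705, 64897, 15680, 65281, 16320, 16000, 65089,
--         64001, 15040, 15232, 64321, 14592, 63937, 63617, 14400, 10240, 59585, 59777,
--         10560, 60161, 11200, 10880, 59969, 60929, 11968, 12160, 61249, 11520, 60865,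
--         60545, 11328, 58369,  9408,  9600, 58689,  9984, 59329, 59009,  9792,  8704,
--         58049, 58241,  9024, 57601,  8640,  8320, 57409, 40961, 24768, 24960, 41281,
--         25344, 41921, 41601, 25152, 26112, 42689, 42881, 26432, 42241, 26048, 25728,
--         42049, 27648, 44225, 44417, 27968, 44801, 28608, 28288, 44609, 43521, 27328,
--         27520, 43841, 26880, 43457, 43137, 26688, 30720, 47297, 47489, 31040, 47873,
--         31680, 31360, 47681, 48641, 32448, 32640, 48961, 32000, 48577, 48257, 31808,
--         46081, 29888, 30080, 46401, 30464, 47041, 46721, 30272, 29184, 45761, 45953,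
--         29504, 45313, 29120, 28800, 45121, 20480, 37057, 37249, 20800, 37633, 21440,
--         21120, 37441, 38401, 22208, 22400, 38721, 21760, 38337, 38017, 21568, 39937,
--         23744, 23936, 40257, 24320, 40897, 40577, 24128, 23040, 39617, 39809, 23360,
--         39169, 22976, 22656, 38977, 34817, 18624, 18816, 35137, 19200, 35777, 35457,
--         19008, 19968, 36545, 36737, 20288, 36097, 19904, 19584, 35905, 17408, 33985,
--         34177, 17728, 34561, 18368, 18048, 34369, 33281, 17088, 17280, 33601, 16640,
--         33217, 32897, 16448)
--     """CRC-16 lookup table with 256 elements. Built with this code: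
--         poly=0xA001; table = []
--         for index in range(256):
--             data = index << 1
--             crc = 0
--             for _ in range(8, 0, -1):
--                 data >>= 1
--                 if (data ^ crc) & 0x0001:
--                     crc = (crc >> 1) ^ poly
--                 else:
--                     crc >>= 1
--             table.append(crc)
--         output = ''
--         for i, m in enumerate(table):
--             if not i%11:
--                 output += "\n"
--             output += "{:5.0f}, ".format(m)
--         print output """
--     register = 0xFFFF
--     for c in data:
--         register = (register >> 8) ^ crc16tabelle[(register ^ c) & 0xFF]
--     res = data[:]
--     res.append(register & 0xFF)
--     res.append(register//256)
--     return res
-- ===== SOURCE B (Python) =====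
-- def addCRC(data):
--     """CRC-16/Modbus computed bit-by-bit (no lookup table), appended little-endian."""
--     register = 0xFFFF
--     for c in data:
--         register ^= (c & 0xFF)
--         for _ in range(8):
--             if register & 1:
--                 register = (register >> 1) ^ 0xA001
--             else:
--                 register >>= 1
--     res = data[:]
--     res.append(register & 0xFF)
--     res.append(register // 256)
--     return res
-- ===== Notes on version B (the rewrite author's own statement) =====
-- stated objective: simpler
-- what changed: Replaces A's 256-entry precomputed CRC lookup table (one table lookup per byte) with the direct bitwise CRC-16/Modbus polynomial computation: xor the byte in, then eight shift/conditional-xor rounds with 0xA001.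
import Mathlib
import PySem

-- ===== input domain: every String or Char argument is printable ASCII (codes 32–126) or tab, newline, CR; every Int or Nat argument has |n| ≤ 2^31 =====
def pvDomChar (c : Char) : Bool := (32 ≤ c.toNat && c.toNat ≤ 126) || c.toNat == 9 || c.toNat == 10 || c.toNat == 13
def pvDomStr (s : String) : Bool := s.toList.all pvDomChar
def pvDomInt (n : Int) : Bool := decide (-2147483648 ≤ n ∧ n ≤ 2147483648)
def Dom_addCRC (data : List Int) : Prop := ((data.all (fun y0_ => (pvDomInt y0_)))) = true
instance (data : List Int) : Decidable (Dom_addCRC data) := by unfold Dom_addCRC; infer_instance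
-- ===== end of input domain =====

-- B replaces A's 256-entry lookup table by the bitwise CRC-16/Modbus polynomial loop (8 shift/xor rounds per byte); simpler, no speed claim.

-- ===== PORT A =====
def crc16tabelle : List Int := [0, 49345, 49537, 320, 49921, 960, 640, 49729, 50689, 1728, 1920, 51009, 1280, 50625, 50305, 1088, 52225, 3264, 3456, 52545, 3840, 53185, 52865, 3648, 2560, 51905, 52097, 2880, 51457, 2496, 2176, 51265, 55297, 6336, 6528, 55617, 6912, 56257, 55937, 6720, 7680, 57025, 57217, 8000, 56577, 7616, 7296, 56385, 5120, 54465, 54657, 5440, 55041, 6080, 5760, 54849, 53761, 4800, 4992, 54081, 4352, 53697, 53377, 4160, 61441, 12480, 12672, 61761, 13056, 62401, 62081, 12864, 13824, 63169, 63361, 14144, 62721, 13760, 13440, 62529, 15360, 64705, 64897, 15680, 65281, 16320, 16000, 65089, 64001, 15040, 15232, 64321, 14592, 63937, 63617, 14400, 10240, 59585, 59777, 10560, 60161, 11200, 10880, 59969, 60929, 11968, 12160, 61249, 11520, 60865, 60545, 11328, 58369, 9408, 9600, 58689, 9984, 59329, 59009, 9792, 8704, 58049, 58241, 9024, 57601,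 8640, 8320, 57409, 40961, 24768, 24960, 41281, 25344, 41921, 41601, 25152, 26112, 42689, 42881, 26432, 42241, 26048, 25728, 42049, 27648, 44225, 44417, 27968, 44801, 28608, 28288, 44609, 43521, 27328, 27520, 43841, 26880, 43457, 43137, 26688, 30720, 47297, 47489, 31040, 47873, 31680, 31360, 47681, 48641, 32448, 32640, 48961, 32000, 48577, 48257, 31808, 46081, 29888, 30080, 46401, 30464, 47041, 46721, 30272, 29184, 45761, 45953, 29504, 45313, 29120, 28800, 45121, 20480, 37057, 37249, 20800, 37633, 21440, 21120, 37441, 38401, 22208, 22400, 38721, 21760, 38337, 38017, 21568, 39937, 23744, 23936, 40257, 24320, 40897, 40577, 24128, 23040, 39617, 39809, 23360, 39169, 22976, 22656, 38977, 34817, 18624, 18816, 35137, 19200, 35777, 35457, 19008, 19968, 36545, 36737, 20288, 36097, 19904, 19584, 35905, 17408, 33985, 34177, 17728, 34561, 18368, 18048, 34369, 33281, 17088, 17280, 33601, 16640, 33217, 32897, 16448]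

def addCRC (data : List Int) : List Int :=
  let register : Int := data.foldl (fun register c =>
    PySem.Int.bxor (register >>> (8 : Nat))
      ((PySem.List.pyGet? crc16tabelle (PySem.Int.band (PySem.Int.bxor register c) 255)).getD 0)) 65535
  data ++ [PySem.Int.band register 255, PySem.Int.floordiv register 256]

-- ===== PORT B =====
def addCRC_alt (data : List Int) : List Int :=
  let register : Int := data.foldl (fun register c =>
    (PySem.List.pyRange 0 8 1).foldl (fun register _ =>
      if PySem.Int.band register 1 = 1 then PySem.Int.bxor (register >>> (1 : Nat)) 40961
      else register >>> (1 : Nat))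
    (PySem.Int.bxor register (PySem.Int.band c 255))) 65535
  data ++ [PySem.Int.band register 255, PySem.Int.floordiv register 256]

-- ===== PRECONDITION & SPEC =====
def Spec_addCRC (data : List Int) (out : List Int) : Prop := out = addCRC_alt data
instance (data : List Int) (out : List Int) : Decidable (Spec_addCRC data out) := by unfold Spec_addCRC; infer_instance

-- ===== CLAIM (what is proved, stated in full; the proofs are below) =====
def Claim_equal_addCRC : Prop := ∀ (data : List Int), Dom_addCRC data → Spec_addCRC data (addCRC data)

-- ===== LEMMAS AND PROOFS =====

-- one CRC round on a Nat register
def natRound (x : Nat) : Nat := if x &&& 1 = 1 then (x >>> 1) ^^^ 40961 else x >>> 1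

-- byte extracted from an arbitrary Python int, as B does it
def cByte (c : Int) : Nat := (PySem.Int.band c 255).toNat

-- the common Nat-level step both ports compute per element
def natStep (r : Nat) (c : Int) : Nat := natRound^[8] (r ^^^ cByte c)

theorem e255 : (255 : Int) = ((255 : Nat) : Int) := rfl
theorem toNat255 : (255 : Int).toNat = 255 := rfl
theorem e1 : (1 : Int) = ((1 : Nat) : Int) := rfl
theorem e40961 : (40961 : Int) = ((40961 : Nat) : Int) := rfl

theorem t255 (i : Nat) : Nat.testBit 255 i = decide (i < 8) := by
  rw [show (255 : Nat) = 2 ^ 8 - 1 by norm_num, Nat.testBit_two_pow_sub_one]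

theorem shiftRight_xor (x y k : Nat) : (x ^^^ y) >>> k = (x >>> k) ^^^ (y >>> k) := by
  apply Nat.eq_of_testBit_eq; intro i
  simp [Nat.testBit_shiftRight, Nat.testBit_xor]

set_option maxRecDepth 10000 in
theorem sub255_eq_xor : ∀ v < 256, 255 - v = 255 ^^^ v := by decide

theorem and255_lt (x : Nat) : x &&& 255 < 256 :=
  Nat.lt_succ_of_le (Nat.and_le_right)

theorem parity (z : Nat) : z &&& 1 = 0 ∨ z &&& 1 = 1 := by
  rw [Nat.and_one_is_mod]; omega

theorem natRound_xor (x y : Nat) : natRound (x ^^^ y) = natRound x ^^^ natRound y := by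
  unfold natRound
  have hx : (x ^^^ y) &&& 1 = (x &&& 1) ^^^ (y &&& 1) := Nat.and_xor_distrib_right ..
  have hs := shiftRight_xor x y 1
  rcases parity x with hxx | hxx <;> rcases parity y with hyy | hyy <;>
      rw [hx, hxx, hyy] <;> norm_num [hs]
  all_goals simp [Nat.xor_assoc, Nat.xor_comm, Nat.xor_left_comm, Nat.xor_self]

theorem natRound_iter_xor (k x y : Nat) :
    natRound^[k] (x ^^^ y) = natRound^[k] x ^^^ natRound^[k] y := by
  induction k generalizing x y with
  | zero => simp
  | succ k ih => simp [Function.iterate_succ_apply, natRound_xor, ih]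

theorem natRound_iter_mul (k h : Nat) : natRound^[k] (h * 2 ^ k) = h := by
  induction k generalizing h with
  | zero => simp
  | succ k ih =>
    have heven : (h * 2 ^ (k + 1)) &&& 1 = 0 := by
      rw [Nat.and_one_is_mod, pow_succ, ← Nat.mul_assoc, Nat.mul_mod_left]
    have hstep : natRound (h * 2 ^ (k + 1)) = h * 2 ^ k := by
      unfold natRound
      rw [heven, if_neg (by omega), Nat.shiftRight_one, pow_succ, ← Nat.mul_assoc]
      omega
    rw [Function.iterate_succ_apply, hstep, ih]

theorem decomp (x : Nat) : (x >>> 8) * 256 ^^^ (x &&& 255) = x := by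
  apply Nat.eq_of_testBit_eq; intro i
  have h256 : (x >>> 8) * 256 = (x >>> 8) <<< 8 := by
    simp [Nat.shiftLeft_eq]
  rw [h256, Nat.testBit_xor, Nat.testBit_shiftLeft, Nat.testBit_land,
    Nat.testBit_shiftRight, t255]
  by_cases h : i < 8
  · simp [h, Nat.not_le.mpr h]
  · have h8 : 8 + (i - 8) = i := by omega
    simp [h, Nat.le_of_not_lt h, h8]

-- MAIN: eight bit rounds = shift-by-8 xor eight rounds of the low byte
theorem main_rounds (x : Nat) :
    natRound^[8] x = (x >>> 8) ^^^ natRound^[8] (x &&& 255) := by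
  conv_lhs => rw [← decomp x]
  rw [natRound_iter_xor]
  congr 1
  rw [show (256 : Nat) = 2 ^ 8 by norm_num, natRound_iter_mul]

-- the low byte's eight rounds agree with A's table (256 cases)
set_option maxRecDepth 20000 in
theorem table_low : ∀ l : Nat, l < 256 →
    (PySem.List.pyGet? crc16tabelle (l : Int)).getD 0 = ((natRound^[8] l : Nat) : Int) := by
  decide

-- the byte B xors in, as an Int cast
theorem band255_cast (c : Int) : PySem.Int.band c 255 = ((cByte c : Nat) : Int) := by
  unfold cByte PySem.Int.band
  by_cases hc : 0 ≤ c
  · rw [if_pos hc, if_pos (by norm_num)]; simp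
  · rw [if_neg hc, if_pos (by norm_num)]; simp

theorem cByte_lt (c : Int) : cByte c < 256 := by
  unfold cByte PySem.Int.band
  by_cases hc : 0 ≤ c
  · rw [if_pos hc, if_pos (by norm_num)]
    simp only [Int.toNat_natCast, toNat255]
    exact Nat.lt_succ_of_le Nat.and_le_right
  · rw [if_neg hc, if_pos (by norm_num)]
    simp only [Int.toNat_natCast, toNat255]
    omega

-- bridge: one Int round of port B equals natRound on a cast
theorem roundI_cast (x : Nat) :
    (if PySem.Int.band (x : Int) 1 = 1 then PySem.Int.bxor ((x : Int) >>> (1 : Nat)) 40961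
     else (x : Int) >>> (1 : Nat)) = ((natRound x : Nat) : Int) := by
  rw [e1, PySem.Int.band_natCast, ← Int.natCast_shiftRight]
  unfold natRound
  rcases parity x with h | h
  · rw [h]; norm_num
  · rw [h]; norm_num
    rw [← Int.natCast_shiftRight, e40961, PySem.Int.bxor_natCast]

-- KEY-IDX: A's table index equals the masked xor with B's byte
theorem key_idx (a : Nat) (c : Int) :
    PySem.Int.band (PySem.Int.bxor (a : Int) c) 255 = (((a ^^^ cByte c) &&& 255 : Nat) : Int) := by
  by_cases hc : 0 ≤ c
  · have hcb : cByte c = c.toNat &&& 255 := by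
      unfold cByte PySem.Int.band
      rw [if_pos hc, if_pos (by norm_num)]; simp
    conv_lhs => rw [show c = ((c.toNat : Nat) : Int) by simp [Int.toNat_of_nonneg hc]]
    rw [PySem.Int.bxor_natCast, e255, PySem.Int.band_natCast, hcb, Nat.cast_inj]
    apply Nat.eq_of_testBit_eq; intro i
    simp only [Nat.testBit_land, Nat.testBit_xor, t255]
    by_cases h : i < 8 <;> simp [h]
  · have hcb : cByte c = 255 - (255 &&& (-c - 1).toNat) := by
      unfold cByte PySem.Int.band
      rw [if_neg hc, if_pos (by norm_num)]
      simp [Nat.land_comm]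
    have hbxor : PySem.Int.bxor (a : Int) c = -((a ^^^ (-c - 1).toNat : Nat) : Int) - 1 := by
      unfold PySem.Int.bxor
      rw [if_pos (by exact_mod_cast Nat.zero_le a), if_neg hc]
      simp
    rw [hbxor]
    unfold PySem.Int.band
    rw [if_neg (by omega), if_pos (by norm_num)]
    have hneg : (-(-((a ^^^ (-c - 1).toNat : Nat) : Int) - 1) - 1) = ((a ^^^ (-c - 1).toNat : Nat) : Int) := by ring
    rw [hneg]
    simp only [Int.toNat_natCast, toNat255, hcb]
    rw [Nat.cast_inj]
    set n := (-c - 1).toNat with hn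
    have hle1 : 255 &&& (a ^^^ n) ≤ 255 := Nat.and_le_left
    have hle2 : 255 &&& n ≤ 255 := Nat.and_le_left
    rw [sub255_eq_xor _ (by omega), sub255_eq_xor _ (by omega)]
    apply Nat.eq_of_testBit_eq; intro i
    simp only [Nat.testBit_land, Nat.testBit_xor, t255]
    by_cases h : i < 8 <;> simp [h]

-- step of port A equals natStep (on a cast register)
theorem stepA_cast (a : Nat) (c : Int) :
    PySem.Int.bxor ((a : Int) >>> (8 : Nat))
      ((PySem.List.pyGet? crc16tabelle (PySem.Int.band (PySem.Int.bxor (a : Int) c) 255)).getD 0)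
    = ((natStep a c : Nat) : Int) := by
  rw [key_idx, table_low _ (and255_lt _), ← Int.natCast_shiftRight, PySem.Int.bxor_natCast]
  unfold natStep
  rw [main_rounds (a ^^^ cByte c)]
  congr 2
  rw [shiftRight_xor]
  have hz : cByte c >>> 8 = 0 := by
    rw [Nat.shiftRight_eq_div_pow]
    exact Nat.div_eq_of_lt (lt_of_lt_of_le (cByte_lt c) (by norm_num))
  simp [hz]

-- step of port B equals natStep (on a cast register)
theorem stepB_cast (a : Nat) (c : Int) :
    (PySem.List.pyRange 0 8 1).foldl (fun register _ =>
      if PySem.Int.band register 1 = 1 then PySem.Int.bxor (register >>> (1 : Nat)) 40961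
      else register >>> (1 : Nat)) (PySem.Int.bxor (a : Int) (PySem.Int.band c 255))
    = ((natStep a c : Nat) : Int) := by
  rw [band255_cast, PySem.Int.bxor_natCast,
    show PySem.List.pyRange 0 8 1 = [0, 1, 2, 3, 4, 5, 6, 7] from by decide]
  simp only [List.foldl_cons, List.foldl_nil, roundI_cast]
  rfl

-- both outer folds equal the Nat fold
theorem foldA_cast (l : List Int) (a : Nat) :
    l.foldl (fun register c =>
      PySem.Int.bxor (register >>> (8 : Nat))
        ((PySem.List.pyGet? crc16tabelle (PySem.Int.band (PySem.Int.bxor register c) 255)).getD 0)) (a : Int)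
    = ((l.foldl natStep a : Nat) : Int) := by
  induction l generalizing a with
  | nil => rfl
  | cons x xs ih => rw [List.foldl_cons, List.foldl_cons, stepA_cast, ih]

theorem foldB_cast (l : List Int) (a : Nat) :
    l.foldl (fun register c =>
      (PySem.List.pyRange 0 8 1).foldl (fun register _ =>
        if PySem.Int.band register 1 = 1 then PySem.Int.bxor (register >>> (1 : Nat)) 40961
        else register >>> (1 : Nat)) (PySem.Int.bxor register (PySem.Int.band c 255))) (a : Int)
    = ((l.foldl natStep a : Nat) : Int) := by
  induction l generalizing a with
  | nil => rfl
  | cons x xs ih => rw [List.foldl_cons, List.foldl_cons, stepB_cast, ih]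

-- ===== VERDICT (by name: the statement is the Claim_ definition above) =====
theorem addCRC_spec : Claim_equal_addCRC := by
  intro data _
  show addCRC data = addCRC_alt data
  unfold addCRC addCRC_alt
  rw [show (65535 : Int) = ((65535 : Nat) : Int) from rfl]
  rw [foldA_cast, foldB_cast]
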